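-- pv_equiv track=rewrite | github.com/yotam-livny/LLMsknow | visualization/backend/core/correctness.py | compute_correctness_nli
-- ===== SOURCE A (Python) =====
-- def compute_correctness_nli(model_answer: str, expected_answer: str) -> bool:
--     """NLI/MNLI: find which label appears first."""
--     labels_dict = {
--         'neutral': ['neutrality', 'neutral', 'neutality'],
--         'entailment': ['entailment', 'entail'],
--         'contradiction': ['contradiction', 'contradict']
--     }
--
--     correct_answer = expected_answer.lower().strip()
--     if correct_answer not in labels_dict:
--         return False
--
--     first_label = None
--     min_idx = len(model_answer)
--
--     for label_name, label_variants in labels_dict.items():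
--         for label_str in label_variants:
--             idx = model_answer.lower().find(label_str)
--             if idx != -1 and idx < min_idx:
--                 first_label = label_name
--                 min_idx = idx
--
--     return first_label == correct_answer
-- ===== SOURCE B (Python) =====
-- _NLI_VARIANTS = [
--     ('neutrality', 'neutral'), ('neutral', 'neutral'), ('neutality', 'neutral'),
--     ('entailment', 'entailment'), ('entail', 'entailment'),
--     ('contradiction', 'contradiction'), ('contradict', 'contradiction'),
-- ]
--
-- def compute_correctness_nli(model_answer: str, expected_answer: str) -> bool:
--     """NLI/MNLI: single left-to-right scan; the first variant-match decides."""
--     correct = expected_answer.lower().strip()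
--     if correct not in ('neutral', 'entailment', 'contradiction'):
--         return False
--     text = model_answer.lower()
--     for i in range(len(text)):
--         for variant, label in _NLI_VARIANTS:
--             if text.startswith(variant, i):
--                 return label == correct
--     return False
-- ===== Notes on version B (the rewrite author's own statement) =====
-- stated objective: alternative
-- what changed: Replaces the nested dict loop of seven repeated .find calls with min-index bookkeeping by a single left-to-right scan that stops at the first position where any label variant starts (distinct first letters make the leftmost match's label equal the global minimum-index label).
import Mathlib
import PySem

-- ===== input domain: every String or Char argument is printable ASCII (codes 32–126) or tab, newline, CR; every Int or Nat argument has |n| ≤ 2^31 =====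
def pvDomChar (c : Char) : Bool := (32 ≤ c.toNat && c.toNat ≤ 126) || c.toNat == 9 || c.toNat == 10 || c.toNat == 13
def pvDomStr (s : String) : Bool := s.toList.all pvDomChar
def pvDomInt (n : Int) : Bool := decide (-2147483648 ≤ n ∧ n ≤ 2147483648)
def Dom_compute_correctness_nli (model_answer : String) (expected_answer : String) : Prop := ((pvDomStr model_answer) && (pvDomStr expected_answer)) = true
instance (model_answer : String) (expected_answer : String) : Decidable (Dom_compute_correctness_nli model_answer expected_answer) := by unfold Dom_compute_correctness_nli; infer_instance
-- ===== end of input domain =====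

-- B replaces A's seven repeated .find scans (min-index bookkeeping over a dict) by one
-- left-to-right scan stopping at the first position where any label variant starts (alternative; same cost).

-- ===== PORT A =====
def nliLabelsDict : List (String × List String) :=
  [("neutral", ["neutrality", "neutral", "neutality"]),
   ("entailment", ["entailment", "entail"]),
   ("contradiction", ["contradiction", "contradict"])]

def compute_correctness_nli (model_answer : String) (expected_answer : String) : Bool :=
  let labels_dict := nliLabelsDict
  let correct_answer := PySem.Str.strip (PySem.Str.lower expected_answer)
  if ((labels_dict.map Prod.fst).contains correct_answer) = false then false
  else
    let st :=
      labels_dict.foldl (fun (st : Option String × Int) label_pair =>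
        label_pair.2.foldl (fun (st : Option String × Int) label_str =>
          let idx := PySem.Str.find (PySem.Str.lower model_answer) label_str
          if idx ≠ -1 ∧ idx < st.2 then (some label_pair.1, idx) else st) st)
        (none, (PySem.Str.len model_answer : Int))
    match st.1 with
    | some l => l == correct_answer
    | none => false

-- ===== PORT B =====
def nliVariants : List (String × String) :=
  [("neutrality", "neutral"), ("neutral", "neutral"), ("neutality", "neutral"),
   ("entailment", "entailment"), ("entail", "entailment"),
   ("contradiction", "contradiction"), ("contradict", "contradiction")]

-- inner loop of B: first (variant, label) pair whose variant starts here
def nliHit (t : List Char) : List (String × String) → Option String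
  | [] => none
  | (v, lab) :: rest => if PySem.Chars.startswith t v.toList then some lab else nliHit t rest

-- outer loop of B: scan positions left to right (list suffixes = offsets i)
def nliScan (correct : String) : List Char → Bool
  | [] => false
  | c :: rest =>
      match nliHit (c :: rest) nliVariants with
      | some lab => lab == correct
      | none => nliScan correct rest

def compute_correctness_nli_alt (model_answer : String) (expected_answer : String) : Bool :=
  let correct := PySem.Str.strip (PySem.Str.lower expected_answer)
  if ["neutral", "entailment", "contradiction"].contains correct then
    nliScan correct (PySem.Chars.lower model_answer.toList)
  else false

-- ===== PRECONDITION & SPEC =====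
def Spec_compute_correctness_nli (model_answer : String) (expected_answer : String) (out : Bool) : Prop := out = compute_correctness_nli_alt model_answer expected_answer
instance (model_answer : String) (expected_answer : String) (out : Bool) : Decidable (Spec_compute_correctness_nli model_answer expected_answer out) := by unfold Spec_compute_correctness_nli; infer_instance

-- ===== CLAIM (what is proved, stated in full; the proofs are below) =====
def Claim_equal_compute_correctness_nli : Prop := ∀ (model_answer : String) (expected_answer : String), Dom_compute_correctness_nli model_answer expected_answer → Spec_compute_correctness_nli model_answer expected_answer (compute_correctness_nli model_answer expected_answer)

-- ===== LEMMAS AND PROOFS =====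

-- A's flattened (label, variant) list, in A's iteration order
def nliFlat : List (String × String) :=
  [("neutral", "neutrality"), ("neutral", "neutral"), ("neutral", "neutality"),
   ("entailment", "entailment"), ("entailment", "entail"),
   ("contradiction", "contradiction"), ("contradiction", "contradict")]

-- A's inner-loop body on the lowered character list
def nliStep (s : List Char) (st : Option String × Int) (p : String × String) : Option String × Int :=
  let idx := PySem.Chars.find s p.2.toList
  if idx ≠ -1 ∧ idx < st.2 then (some p.1, idx) else st

lemma find_cons (c : Char) (s v : List Char) :
    PySem.Chars.find (c :: s) v =
      if PySem.Chars.startswith (c :: s) v then 0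
      else if PySem.Chars.find s v = -1 then -1 else PySem.Chars.find s v + 1 := by
  by_cases hpre : v <+: (c :: s)
  · rw [if_pos ((PySem.Chars.startswith_iff _ _).mpr hpre)]
    have hnn : 0 ≤ PySem.Chars.find (c :: s) v :=
      (PySem.Chars.find_nonneg_iff _ _).mpr hpre.isInfix
    obtain ⟨h1, h2⟩ := PySem.Chars.find_spec hnn
    have h0 : (PySem.Chars.find (c :: s) v).toNat = 0 := by
      by_contra h
      exact h2 0 (Nat.pos_of_ne_zero h) (by simpa using hpre)
    omega
  · rw [if_neg (by simpa [PySem.Chars.startswith_iff] using hpre)]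
    by_cases hin : v <:+: s
    · have hfs : 0 ≤ PySem.Chars.find s v := (PySem.Chars.find_nonneg_iff _ _).mpr hin
      rw [if_neg (by omega)]
      have hincs : v <:+: (c :: s) := hin.trans (List.suffix_cons c s).isInfix
      have hcs : 0 ≤ PySem.Chars.find (c :: s) v := (PySem.Chars.find_nonneg_iff _ _).mpr hincs
      obtain ⟨p1, p2⟩ := PySem.Chars.find_spec hcs
      obtain ⟨q1, q2⟩ := PySem.Chars.find_spec hfs
      have ha0 : (PySem.Chars.find (c :: s) v).toNat ≠ 0 := by
        intro h; exact hpre (by simpa [h] using p1)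
      have hdown : v <+: s.drop ((PySem.Chars.find (c :: s) v).toNat - 1) := by
        have := p1
        rwa [show (c :: s).drop (PySem.Chars.find (c :: s) v).toNat
              = s.drop ((PySem.Chars.find (c :: s) v).toNat - 1) from by
          cases h : (PySem.Chars.find (c :: s) v).toNat with
          | zero => exact absurd h ha0
          | succ k => simp] at this
      have hup : v <+: (c :: s).drop ((PySem.Chars.find s v).toNat + 1) := by
        simpa using q1
      have hle : (PySem.Chars.find (c :: s) v).toNat ≤ (PySem.Chars.find s v).toNat + 1 := by
        by_contra h
        exact p2 ((PySem.Chars.find s v).toNat + 1) (by omega) hup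
      have hge : (PySem.Chars.find s v).toNat ≤ (PySem.Chars.find (c :: s) v).toNat - 1 := by
        by_contra h
        exact q2 ((PySem.Chars.find (c :: s) v).toNat - 1) (by omega) hdown
      omega
    · have h1 : PySem.Chars.find s v = -1 := (PySem.Chars.find_eq_neg_one_iff _ _).mpr hin
      rw [if_pos h1]
      refine (PySem.Chars.find_eq_neg_one_iff _ _).mpr ?_
      intro hinf
      have hIn : PySem.Chars.isIn v (c :: s) = true := (PySem.Chars.isIn_iff_infix _ _).mpr hinf
      obtain ⟨j, hj⟩ := (PySem.Chars.exists_prefix_drop_iff_isIn _ _).mpr hIn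
      cases j with
      | zero => exact hpre (by simpa using hj)
      | succ k =>
          refine hin ?_
          refine (PySem.Chars.isIn_iff_infix _ _).mp ?_
          refine (PySem.Chars.exists_prefix_drop_iff_isIn _ _).mp ⟨k, ?_⟩
          simpa using hj

lemma fold_absorb (s : List Char) (l : List (String × String)) (o : Option String) :
    l.foldl (nliStep s) (o, 0) = (o, 0) := by
  induction l with
  | nil => rfl
  | cons p rest ih =>
      have hge : -1 ≤ PySem.Chars.find s p.2.toList := PySem.Chars.neg_one_le_find _ _
      simp only [List.foldl_cons]
      rw [show nliStep s (o, 0) p = (o, 0) from by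
        simp only [nliStep]
        rw [if_neg (by push Not; intro h; omega)]]
      exact ih

lemma step_shift (c : Char) (s : List Char) (p : String × String)
    (hp : PySem.Chars.startswith (c :: s) p.2.toList = false) (o : Option String) (m : Int) :
    nliStep (c :: s) (o, m + 1) p = ((nliStep s (o, m) p).1, (nliStep s (o, m) p).2 + 1) := by
  have hge : -1 ≤ PySem.Chars.find s p.2.toList := PySem.Chars.neg_one_le_find _ _
  simp only [nliStep, find_cons c s p.2.toList, hp, Bool.false_eq_true, if_false]
  by_cases hf : PySem.Chars.find s p.2.toList = -1
  · rw [if_pos hf]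
    rw [if_neg (by push Not; intro h; omega)]
    rw [if_neg (by push Not; intro h; exact absurd hf h)]
  · rw [if_neg hf]
    by_cases hlt : PySem.Chars.find s p.2.toList < m
    · rw [if_pos ⟨by omega, by omega⟩, if_pos ⟨hf, hlt⟩]
    · rw [if_neg (by push Not; intro _; omega), if_neg (by push Not; intro _; omega)]

lemma fold_shift (c : Char) (s : List Char) (l : List (String × String))
    (h : ∀ p ∈ l, PySem.Chars.startswith (c :: s) p.2.toList = false) :
    ∀ (o : Option String) (m : Int),
      l.foldl (nliStep (c :: s)) (o, m + 1)
        = ((l.foldl (nliStep s) (o, m)).1, (l.foldl (nliStep s) (o, m)).2 + 1) := by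
  induction l with
  | nil => intro o m; rfl
  | cons p rest ih =>
      intro o m
      simp only [List.foldl_cons]
      rw [step_shift c s p (h p List.mem_cons_self) o m]
      exact ih (fun q hq => h q (List.mem_cons_of_mem _ hq)) _ _

lemma nliHit_none (t : List Char) (l : List (String × String)) (h : nliHit t l = none) :
    ∀ p ∈ l, PySem.Chars.startswith t p.1.toList = false := by
  induction l with
  | nil => intro p hp; cases hp
  | cons q rest ih =>
      intro p hp
      obtain ⟨v, lab⟩ := q
      by_cases hq : PySem.Chars.startswith t v.toList
      · simp [nliHit, hq] at h
      · rcases List.mem_cons.mp hp with rfl | hp'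
        · simpa using hq
        · exact ih (by simpa [nliHit, hq] using h) p hp'

lemma fold_hit (c : Char) (s : List Char) (l : List (String × String)) (lab : String)
    (h : nliHit (c :: s) (l.map (fun p => (p.2, p.1))) = some lab) :
    ∀ (o : Option String) (m : Int), 1 ≤ m →
      (l.foldl (nliStep (c :: s)) (o, m)).1 = some lab := by
  induction l with
  | nil => simp [nliHit] at h
  | cons p rest ih =>
      intro o m hm
      simp only [List.map_cons, nliHit] at h
      by_cases hsw : PySem.Chars.startswith (c :: s) p.2.toList
      · rw [if_pos hsw] at h
        have hlab : p.1 = lab := by simpa using h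
        simp only [List.foldl_cons]
        rw [show nliStep (c :: s) (o, m) p = (some p.1, 0) from by
          simp only [nliStep, find_cons c s p.2.toList, hsw, if_true]
          rw [if_pos ⟨by omega, by omega⟩]]
        rw [fold_absorb, hlab]
      · rw [if_neg hsw] at h
        simp only [List.foldl_cons]
        have hge : -1 ≤ PySem.Chars.find (c :: s) p.2.toList := PySem.Chars.neg_one_le_find _ _
        have hstep : 1 ≤ (nliStep (c :: s) (o, m) p).2 ∧
            (nliStep (c :: s) (o, m) p) = ((nliStep (c :: s) (o, m) p).1, (nliStep (c :: s) (o, m) p).2) := by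
          constructor
          · simp only [nliStep, find_cons c s p.2.toList, hsw, Bool.false_eq_true, if_false]
            by_cases hf : PySem.Chars.find s p.2.toList = -1
            · rw [if_pos hf]
              rw [if_neg (by push Not; intro hne; omega)]
              exact hm
            · have hge' : -1 ≤ PySem.Chars.find s p.2.toList := PySem.Chars.neg_one_le_find _ _
              rw [if_neg hf]
              by_cases hcond : PySem.Chars.find s p.2.toList + 1 ≠ -1 ∧ PySem.Chars.find s p.2.toList + 1 < m
              · rw [if_pos hcond]; omega
              · rw [if_neg hcond]; exact hm
          · rfl
        rw [hstep.2]
        exact ih h _ _ hstep.1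

-- spine of the equivalence: B's scan computes the label-match of A's min-index fold
lemma scan_eq_fold (correct : String) :
    ∀ s : List Char,
      nliScan correct s =
        (match (nliFlat.foldl (nliStep s) (none, (s.length : Int))).1 with
         | some l => l == correct
         | none => false) := by
  intro s
  induction s with
  | nil => rfl
  | cons c s ih =>
      cases h : nliHit (c :: s) nliVariants with
      | some lab =>
          have hmap : nliFlat.map (fun p => (p.2, p.1)) = nliVariants := by
            simp [nliFlat, nliVariants]
          have h1 : (nliFlat.foldl (nliStep (c :: s)) (none, ((c :: s).length : Int))).1 = some lab := by
            refine fold_hit c s nliFlat lab (by rw [hmap]; exact h) none _ ?_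
            simp only [List.length_cons]
            push_cast
            omega
          simp only [nliScan, h, h1]
      | none =>
          have hall : ∀ p ∈ nliFlat, PySem.Chars.startswith (c :: s) p.2.toList = false := by
            have h' := nliHit_none _ _ h
            intro p hp
            fin_cases hp
            · exact h' ("neutrality", "neutral") (by simp [nliVariants])
            · exact h' ("neutral", "neutral") (by simp [nliVariants])
            · exact h' ("neutality", "neutral") (by simp [nliVariants])
            · exact h' ("entailment", "entailment") (by simp [nliVariants])
            · exact h' ("entail", "entailment") (by simp [nliVariants])
            · exact h' ("contradiction", "contradiction") (by simp [nliVariants])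
            · exact h' ("contradict", "contradiction") (by simp [nliVariants])
          have hlen : ((c :: s).length : Int) = (s.length : Int) + 1 := by
            simp only [List.length_cons]; push_cast; ring
          have h2 := fold_shift c s nliFlat hall none (s.length : Int)
          simp only [nliScan, h, ih, hlen, h2]

-- A's nested literal fold equals the flat fold over nliFlat on the lowered list
lemma A_fold_flat (model_answer : String) (st : Option String × Int) :
    List.foldl (fun (st : Option String × Int) label_pair =>
        List.foldl (fun (st : Option String × Int) label_str =>
          if PySem.Str.find (PySem.Str.lower model_answer) label_str ≠ -1 ∧
              PySem.Str.find (PySem.Str.lower model_answer) label_str < st.2 then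
            (some label_pair.1, PySem.Str.find (PySem.Str.lower model_answer) label_str)
          else st) st label_pair.2) st
      [("neutral", ["neutrality", "neutral", "neutality"]),
       ("entailment", ["entailment", "entail"]),
       ("contradiction", ["contradiction", "contradict"])]
      = nliFlat.foldl (nliStep (PySem.Chars.lower model_answer.toList)) st := by
  simp [nliFlat, List.foldl_cons, List.foldl_nil, nliStep,
        PySem.Str.find, PySem.Str.toList_lower]

-- ===== VERDICT (by name: the statement is the Claim_ definition above) =====
theorem compute_correctness_nli_spec : Claim_equal_compute_correctness_nli := by
  intro model_answer expected_answer _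
  unfold Spec_compute_correctness_nli
  unfold compute_correctness_nli compute_correctness_nli_alt
  simp only [nliLabelsDict, List.map_cons, List.map_nil]
  by_cases hmem : ([("neutral" : String), "entailment", "contradiction"].contains
      (PySem.Str.strip (PySem.Str.lower expected_answer))) = true
  · rw [if_neg (by rw [hmem]; decide), if_pos hmem]
    rw [A_fold_flat]
    have hlen : PySem.Str.len model_answer
        = ((PySem.Chars.lower model_answer.toList).length : Int) := by
      simp [PySem.Str.len_eq, PySem.Chars.lower]
    rw [hlen]
    exact (scan_eq_fold _ _).symm
  · rw [if_pos (by simpa using hmem), if_neg hmem]
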